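-- pv_equiv track=rewrite | github.com/JVKW/ES-Faculdade-UFC2025.2 | semestre1/FUP/07 - Vetores e Listas/atv30.py | funcao
-- ===== SOURCE A (Python) =====
-- def funcao(lista):
--
--
--     for tam in range(len(lista) - 1, 1, -1): # 5 => 2
--         for i in range(len(lista) - tam): # 0 => 5
--             for j in range(i + 1, len(lista) - tam + 1): # 1 => 5
--
--                 iguais = True
--                 for k in range(tam): # 0 => 5
--                     if lista[i + k] != lista[j + k]:
--                         iguais = False
--                         break
--
--                 if iguais:
--                     return i, j, tam
--
--     return -1, -1, -1
-- ===== SOURCE B (Python) =====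
-- def funcao(lista):
--     # Single pass over pairs (i, j): compute the longest common extension at
--     # (i, j), keep the first pair attaining the maximum. O(n^3) worst case
--     # instead of A's O(n^4) rescans per length.
--     n = len(lista)
--     bi = bj = bt = -1
--     for i in range(n - 1):
--         for j in range(i + 1, n):
--             t = 0
--             while j + t < n and lista[i + t] == lista[j + t]:
--                 t += 1
--             if t > bt:
--                 bi, bj, bt = i, j, t
--     if bt >= 2:
--         return bi, bj, bt
--     return -1, -1, -1
-- ===== Notes on version B (the rewrite author's own statement) =====
-- stated objective: faster
-- what changed: Instead of rescanning every (length, i, j) combination from the longest length down, B makes a single pass over pairs (i, j), computes the longest common extension at each pair, and keeps the first pair attaining the maximum extension (returning it if the maximum is at least 2).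
import Mathlib
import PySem

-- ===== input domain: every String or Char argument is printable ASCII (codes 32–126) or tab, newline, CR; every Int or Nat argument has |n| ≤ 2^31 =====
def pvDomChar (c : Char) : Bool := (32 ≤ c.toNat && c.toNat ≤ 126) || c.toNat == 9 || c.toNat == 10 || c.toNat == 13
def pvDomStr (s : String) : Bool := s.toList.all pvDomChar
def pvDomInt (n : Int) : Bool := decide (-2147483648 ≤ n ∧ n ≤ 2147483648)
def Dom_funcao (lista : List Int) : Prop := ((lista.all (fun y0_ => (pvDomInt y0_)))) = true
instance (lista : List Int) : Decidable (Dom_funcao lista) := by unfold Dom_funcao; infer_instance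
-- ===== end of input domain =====

-- B replaces A's quadruple loop (every length, every pair, rescan) by one pass over pairs
-- (i, j) keeping the first pair attaining the maximal common extension; measured faster.

-- ===== PORT A =====
-- A's innermost k-loop (the `iguais` flag with break at the first mismatch)
def pvCond (lista : List Int) (i j tam : Int) : Bool :=
  (PySem.List.pyRange 0 tam 1).all (fun k =>
    PySem.List.pyGet? lista (i + k) == PySem.List.pyGet? lista (j + k))

-- A's j-loop: first j with a match of length tam starting at i and j (early return)
def pvInnerJ (lista : List Int) (tam i : Int) : Option (List Int) :=
  (PySem.List.pyRange (i + 1) ((lista.length : Int) - tam + 1) 1).findSome? (fun j =>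
    if pvCond lista i j tam then some [i, j, tam] else none)

-- A's i-loop
def pvInnerI (lista : List Int) (tam : Int) : Option (List Int) :=
  (PySem.List.pyRange 0 ((lista.length : Int) - tam) 1).findSome? (fun i =>
    pvInnerJ lista tam i)

def funcao (lista : List Int) : List Int :=
  match (PySem.List.pyRange ((lista.length : Int) - 1) 1 (-1)).findSome? (fun tam =>
      pvInnerI lista tam) with
  | some r => r
  | none => [-1, -1, -1]

-- ===== PORT B =====
-- B's while loop: extend the match at (i, j) from offset t while elements agree
def pvLce (lista : List Int) (i j : Int) : Int → Nat → Int
  | t, 0 => t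
  | t, fuel + 1 =>
    if j + t < (lista.length : Int) ∧
       PySem.List.pyGet? lista (i + t) = PySem.List.pyGet? lista (j + t)
    then pvLce lista i j (t + 1) fuel
    else t

-- B's inner j-loop, carrying the best (bi, bj, bt) found so far
def pvLoopJ (lista : List Int) (i : Int) (s : Int × Int × Int) : Int × Int × Int :=
  (PySem.List.pyRange (i + 1) (lista.length : Int) 1).foldl (fun s j =>
    let t := pvLce lista i j 0 lista.length
    if s.2.2 < t then (i, j, t) else s) s

def funcao_alt (lista : List Int) : List Int :=
  let s := (PySem.List.pyRange 0 ((lista.length : Int) - 1) 1).foldl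
    (fun s i => pvLoopJ lista i s) (-1, -1, -1)
  if 2 ≤ s.2.2 then [s.1, s.2.1, s.2.2] else [-1, -1, -1]

-- ===== PRECONDITION & SPEC =====
def Spec_funcao (lista : List Int) (out : List Int) : Prop := out = funcao_alt lista
instance (lista : List Int) (out : List Int) : Decidable (Spec_funcao lista out) := by unfold Spec_funcao; infer_instance

-- ===== CLAIM (what is proved, stated in full; the proofs are below) =====
def Claim_equal_funcao : Prop := ∀ (lista : List Int), Dom_funcao lista → Spec_funcao lista (funcao lista)

-- ===== LEMMAS AND PROOFS =====

-- the longest common extension at (i, j), as B computes it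
def pvT (lista : List Int) (i j : Int) : Int := pvLce lista i j 0 lista.length

-- B's update step, on explicit pairs
def pvStep (lista : List Int) (s : Int × Int × Int) (p : Int × Int) : Int × Int × Int :=
  if s.2.2 < pvT lista p.1 p.2 then (p.1, p.2, pvT lista p.1 p.2) else s

-- all pairs (i, j) with 0 ≤ i < j < n, in B's (lexicographic) visiting order
def pvPB (n : Int) : List (Int × Int) :=
  (PySem.List.pyRange 0 (n - 1) 1).flatMap (fun i =>
    (PySem.List.pyRange (i + 1) n 1).map (fun j => (i, j)))

lemma pvLce_spec (lista : List Int) (i j : Int) (fuel : Nat) :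
    ∀ (c : Int), 0 ≤ c → ((lista.length : Int) - j - c).toNat ≤ fuel →
    c ≤ pvLce lista i j c fuel ∧
    (∀ k : Int, c ≤ k → k < pvLce lista i j c fuel →
      j + k < (lista.length : Int) ∧
      PySem.List.pyGet? lista (i + k) = PySem.List.pyGet? lista (j + k)) ∧
    ¬ (j + pvLce lista i j c fuel < (lista.length : Int) ∧
       PySem.List.pyGet? lista (i + pvLce lista i j c fuel) =
       PySem.List.pyGet? lista (j + pvLce lista i j c fuel)) := by
  induction fuel with
  | zero =>
    intro c hc hf
    simp only [pvLce]
    refine ⟨le_refl c, by omega, ?_⟩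
    rintro ⟨h1, -⟩
    omega
  | succ fuel ih =>
    intro c hc hf
    by_cases hcond : j + c < (lista.length : Int) ∧
        PySem.List.pyGet? lista (i + c) = PySem.List.pyGet? lista (j + c)
    · have hstep : pvLce lista i j c (fuel + 1) = pvLce lista i j (c + 1) fuel := by
        simp only [pvLce, if_pos hcond]
      obtain ⟨ih1, ih2, ih3⟩ := ih (c + 1) (by omega) (by omega)
      rw [hstep]
      refine ⟨by omega, ?_, ih3⟩
      intro k hk1 hk2
      rcases eq_or_lt_of_le hk1 with h | h
      · exact h ▸ hcond
      · exact ih2 k (by omega) hk2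
    · have hstep : pvLce lista i j c (fuel + 1) = c := by
        simp only [pvLce, if_neg hcond]
      rw [hstep]
      exact ⟨le_refl c, by omega, hcond⟩

lemma pvT_fuel (lista : List Int) (j : Int) (hj : 0 ≤ j) :
    ((lista.length : Int) - j - 0).toNat ≤ lista.length := by omega

lemma pvT_nonneg (lista : List Int) (i j : Int) (hj : 0 ≤ j) : 0 ≤ pvT lista i j :=
  (pvLce_spec lista i j lista.length 0 le_rfl (pvT_fuel lista j hj)).1

lemma pvT_ok (lista : List Int) (i j k : Int) (hj : 0 ≤ j) (hk : 0 ≤ k)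
    (hlt : k < pvT lista i j) :
    j + k < (lista.length : Int) ∧
    PySem.List.pyGet? lista (i + k) = PySem.List.pyGet? lista (j + k) :=
  (pvLce_spec lista i j lista.length 0 le_rfl (pvT_fuel lista j hj)).2.1 k hk hlt

lemma pvT_not_ok (lista : List Int) (i j : Int) (hj : 0 ≤ j) :
    ¬ (j + pvT lista i j < (lista.length : Int) ∧
       PySem.List.pyGet? lista (i + pvT lista i j) =
       PySem.List.pyGet? lista (j + pvT lista i j)) :=
  (pvLce_spec lista i j lista.length 0 le_rfl (pvT_fuel lista j hj)).2.2

lemma pvT_le (lista : List Int) (i j : Int) (hj : 0 ≤ j) (hjn : j ≤ (lista.length : Int)) :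
    pvT lista i j ≤ (lista.length : Int) - j := by
  have h0 := pvT_nonneg lista i j hj
  by_contra h
  have hok := pvT_ok lista i j ((lista.length : Int) - j) hj (by omega) (by omega)
  omega

lemma pvCond_iff (lista : List Int) (i j tam : Int) (hj : 0 ≤ j) (_htam : 0 ≤ tam)
    (hjt : j + tam ≤ (lista.length : Int)) :
    pvCond lista i j tam = true ↔ tam ≤ pvT lista i j := by
  unfold pvCond
  rw [List.all_eq_true]
  constructor
  · intro hall
    by_contra h
    have h0 := pvT_nonneg lista i j hj
    have hmem : pvT lista i j ∈ PySem.List.pyRange 0 tam 1 :=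
      PySem.List.mem_pyRange_one.mpr ⟨h0, by omega⟩
    have := hall _ hmem
    rw [beq_iff_eq] at this
    exact pvT_not_ok lista i j hj ⟨by omega, this⟩
  · intro hle k hk
    rw [PySem.List.mem_pyRange_one] at hk
    rw [beq_iff_eq]
    exact (pvT_ok lista i j k hj hk.1 (by omega)).2

lemma foldl_flatMap_eq {σ β : Type} (L : List Int) (g : Int → List β)
    (upd : σ → β → σ) (s : σ) :
    (L.flatMap g).foldl upd s = L.foldl (fun s i => (g i).foldl upd s) s := by
  induction L generalizing s with
  | nil => rfl
  | cons a L ih => simp [List.foldl_append, ih]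

lemma alt_fold_eq (lista : List Int) (s : Int × Int × Int) :
    (PySem.List.pyRange 0 ((lista.length : Int) - 1) 1).foldl
      (fun s i => pvLoopJ lista i s) s
    = (pvPB (lista.length : Int)).foldl (pvStep lista) s := by
  unfold pvPB
  rw [foldl_flatMap_eq]
  have hf : ∀ (s : Int × Int × Int) (i : Int), pvLoopJ lista i s
      = ((PySem.List.pyRange (i + 1) (lista.length : Int) 1).map
          (fun j => ((i, j) : Int × Int))).foldl (pvStep lista) s := by
    intro s i
    unfold pvLoopJ
    rw [List.foldl_map]
    rfl
  simp only [hf]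

lemma mem_pvPB {n : Int} {p : Int × Int} :
    p ∈ pvPB n ↔ 0 ≤ p.1 ∧ p.1 < p.2 ∧ p.2 < n := by
  obtain ⟨i, j⟩ := p
  simp only [pvPB, List.mem_flatMap, List.mem_map, PySem.List.mem_pyRange_one,
    Prod.mk.injEq]
  constructor
  · rintro ⟨a, ⟨ha0, ha1⟩, j', ⟨hj1, hj2⟩, rfl, rfl⟩
    exact ⟨ha0, by omega, hj2⟩
  · rintro ⟨h0, h1, h2⟩
    exact ⟨i, ⟨h0, by omega⟩, j, ⟨by omega, h2⟩, rfl, rfl⟩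

lemma pairwise_pvPB (n : Int) :
    (pvPB n).Pairwise (fun p q => p.1 < q.1 ∨ (p.1 = q.1 ∧ p.2 < q.2)) := by
  unfold pvPB
  rw [List.pairwise_flatMap]
  constructor
  · intro a _
    rw [List.pairwise_map]
    exact (PySem.List.pairwise_lt_pyRange_one _ _).imp (fun h => Or.inr ⟨rfl, h⟩)
  · refine (PySem.List.pairwise_lt_pyRange_one _ _).imp ?_
    intro a b hab x hx y hy
    simp only [List.mem_map] at hx hy
    obtain ⟨jx, -, rfl⟩ := hx
    obtain ⟨jy, -, rfl⟩ := hy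
    exact Or.inl hab

lemma mem_left_of_lex {n : Int} {L1 L2 : List (Int × Int)} {p q : Int × Int}
    (hsplit : pvPB n = L1 ++ p :: L2) (hq : q ∈ pvPB n)
    (hlex : q.1 < p.1 ∨ (q.1 = p.1 ∧ q.2 < p.2)) : q ∈ L1 := by
  have hpw := pairwise_pvPB n
  rw [hsplit] at hpw hq
  rw [List.pairwise_append] at hpw
  rcases List.mem_append.mp hq with h | h
  · exact h
  · rcases List.mem_cons.mp h with rfl | h
    · omega
    · have := (List.pairwise_cons.mp hpw.2.1).1 q h
      omega

lemma pvFold_char (lista : List Int) (L : List (Int × Int)) (s : Int × Int × Int) :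
    (L.foldl (pvStep lista) s = s ∧ ∀ p ∈ L, pvT lista p.1 p.2 ≤ s.2.2)
    ∨ ∃ L1 p L2, L = L1 ++ p :: L2 ∧
        L.foldl (pvStep lista) s = (p.1, p.2, pvT lista p.1 p.2) ∧
        s.2.2 < pvT lista p.1 p.2 ∧
        (∀ q ∈ L1, pvT lista q.1 q.2 < pvT lista p.1 p.2) ∧
        (∀ q ∈ L2, pvT lista q.1 q.2 ≤ pvT lista p.1 p.2) := by
  induction L generalizing s with
  | nil => exact Or.inl ⟨rfl, by simp⟩
  | cons p0 L ih =>
    by_cases h0 : s.2.2 < pvT lista p0.1 p0.2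
    · have hstep : (p0 :: L).foldl (pvStep lista) s
          = L.foldl (pvStep lista) (p0.1, p0.2, pvT lista p0.1 p0.2) := by
        simp [pvStep, if_pos h0]
      rcases ih (p0.1, p0.2, pvT lista p0.1 p0.2) with ⟨heq, hall⟩ | ⟨L1, p, L2, hsp, heq, hgt, hL1, hL2⟩
      · refine Or.inr ⟨[], p0, L, rfl, ?_, h0, by simp, ?_⟩
        · rw [hstep, heq]
        · intro q hq
          exact hall q hq
      · refine Or.inr ⟨p0 :: L1, p, L2, by simp [hsp], ?_, ?_, ?_, hL2⟩
        · rw [hstep, heq]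
        · simp only at hgt
          omega
        · intro q hq
          rcases List.mem_cons.mp hq with rfl | hq
          · simpa using hgt
          · exact hL1 q hq
    · have hstep : (p0 :: L).foldl (pvStep lista) s = L.foldl (pvStep lista) s := by
        simp [pvStep, if_neg h0]
      rcases ih s with ⟨heq, hall⟩ | ⟨L1, p, L2, hsp, heq, hgt, hL1, hL2⟩
      · refine Or.inl ⟨by rw [hstep, heq], ?_⟩
        intro q hq
        rcases List.mem_cons.mp hq with rfl | hq
        · omega
        · exact hall q hq
      · refine Or.inr ⟨p0 :: L1, p, L2, by simp [hsp], by rw [hstep, heq], hgt, ?_, hL2⟩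
        intro q hq
        rcases List.mem_cons.mp hq with rfl | hq
        · omega
        · exact hL1 q hq

lemma findSome?_range_none {β : Type} (f : Int → Option β) (a b : Int)
    (h : ∀ x, a ≤ x → x < b → f x = none) :
    (PySem.List.pyRange a b 1).findSome? f = none := by
  rw [List.findSome?_eq_none_iff]
  intro x hx
  rw [PySem.List.mem_pyRange_one] at hx
  exact h x hx.1 hx.2

lemma findSome?_range_first {β : Type} (f : Int → Option β) (a b x : Int) (y : β)
    (h1 : a ≤ x) (h2 : x < b) (hf : f x = some y)
    (hb : ∀ z, a ≤ z → z < x → f z = none) :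
    (PySem.List.pyRange a b 1).findSome? f = some y := by
  rw [PySem.List.pyRange_one_append a x b h1 (le_of_lt h2), List.findSome?_append,
    findSome?_range_none f a x hb, PySem.List.pyRange_one_cons h2]
  simp [hf]

lemma findSome?_rangeDesc_none {β : Type} (f : Int → Option β) (a b : Int)
    (h : ∀ x, b < x → x ≤ a → f x = none) :
    (PySem.List.pyRange a b (-1)).findSome? f = none := by
  rw [List.findSome?_eq_none_iff]
  intro x hx
  rw [PySem.List.mem_pyRange_neg_one] at hx
  exact h x hx.1 hx.2

lemma findSome?_rangeDesc_first {β : Type} (f : Int → Option β) (a b x : Int) (y : β)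
    (h1 : b < x) (h2 : x ≤ a) (hf : f x = some y)
    (hb : ∀ z, x < z → z ≤ a → f z = none) :
    (PySem.List.pyRange a b (-1)).findSome? f = some y := by
  rw [PySem.List.pyRange_neg_one_eq_reverse,
    PySem.List.pyRange_one_append (b + 1) (x + 1) (a + 1) (by omega) (by omega),
    List.reverse_append, List.findSome?_append]
  have h2 : ((PySem.List.pyRange (x + 1) (a + 1) 1).reverse).findSome? f = none := by
    rw [List.findSome?_eq_none_iff]
    intro z hz
    rw [List.mem_reverse, PySem.List.mem_pyRange_one] at hz
    exact hb z (by omega) (by omega)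
  rw [h2]
  have h3 : (PySem.List.pyRange (b + 1) (x + 1) 1).reverse
      = PySem.List.pyRange x b (-1) := by
    rw [PySem.List.pyRange_neg_one_eq_reverse]
  rw [h3, PySem.List.pyRange_neg_one_cons h1]
  simp [hf]

lemma A_none_of_ub (lista : List Int) (ub : Int) (hub : ub ≤ 1)
    (hall : ∀ q ∈ pvPB (lista.length : Int), pvT lista q.1 q.2 ≤ ub) :
    (PySem.List.pyRange ((lista.length : Int) - 1) 1 (-1)).findSome? (fun tam =>
      pvInnerI lista tam) = none := by
  apply findSome?_rangeDesc_none
  intro tam h1 h2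
  unfold pvInnerI
  apply findSome?_range_none
  intro i hi0 hi1
  unfold pvInnerJ
  apply findSome?_range_none
  intro j hj0 hj1
  have hmem : ((i, j) : Int × Int) ∈ pvPB (lista.length : Int) :=
    mem_pvPB.mpr ⟨hi0, by omega, by omega⟩
  have hc : pvCond lista i j tam = false := by
    by_contra hc
    rw [Bool.not_eq_false] at hc
    have hle := (pvCond_iff lista i j tam (by omega) (by omega) (by omega)).mp hc
    have := hall (i, j) hmem
    simp only at this
    omega
  rw [hc]
  simp

lemma main_eq (lista : List Int) : funcao lista = funcao_alt lista := by
  have halt : funcao_alt lista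
      = (let s := (pvPB (lista.length : Int)).foldl (pvStep lista) (-1, -1, -1);
         if 2 ≤ s.2.2 then [s.1, s.2.1, s.2.2] else [-1, -1, -1]) := by
    unfold funcao_alt
    rw [alt_fold_eq]
  rcases pvFold_char lista (pvPB (lista.length : Int)) (-1, -1, -1) with
    ⟨heq, hall⟩ | ⟨L1, p, L2, hsplit, heq, hgt, hL1, hL2⟩
  · have hA : (PySem.List.pyRange ((lista.length : Int) - 1) 1 (-1)).findSome?
        (fun tam => pvInnerI lista tam) = none := by
      apply A_none_of_ub lista (-1) (by omega)
      intro q hq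
      exact hall q hq
    unfold funcao
    rw [hA, halt, heq]
    norm_num
  · obtain ⟨i0, j0⟩ := p
    simp only at heq hgt hL1 hL2
    have hpmem : ((i0, j0) : Int × Int) ∈ pvPB (lista.length : Int) := by
      rw [hsplit]
      simp
    have hbounds := mem_pvPB.mp hpmem
    simp only at hbounds
    obtain ⟨hi0, hij, hjn⟩ := hbounds
    have hub : ∀ q ∈ pvPB (lista.length : Int), pvT lista q.1 q.2 ≤ pvT lista i0 j0 := by
      intro q hq
      rw [hsplit] at hq
      rcases List.mem_append.mp hq with h | h
      · exact le_of_lt (hL1 q h)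
      · rcases List.mem_cons.mp h with rfl | h
        · exact le_refl _
        · exact hL2 q h
    have hTle : pvT lista i0 j0 ≤ (lista.length : Int) - j0 :=
      pvT_le lista i0 j0 (by omega) (by omega)
    by_cases hT2 : 2 ≤ pvT lista i0 j0
    · have hBval : funcao_alt lista = [i0, j0, pvT lista i0 j0] := by
        rw [halt, heq]
        simp only
        rw [if_pos hT2]
      have hAval : (PySem.List.pyRange ((lista.length : Int) - 1) 1 (-1)).findSome?
          (fun tam => pvInnerI lista tam) = some [i0, j0, pvT lista i0 j0] := by
        apply findSome?_rangeDesc_first _ _ _ (pvT lista i0 j0) _ (by omega) (by omega)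
        · unfold pvInnerI
          apply findSome?_range_first _ _ _ i0 _ (by omega) (by omega)
          · unfold pvInnerJ
            apply findSome?_range_first _ _ _ j0 _ (by omega) (by omega)
            · rw [if_pos]
              exact (pvCond_iff lista i0 j0 (pvT lista i0 j0)
                (by omega) (by omega) (by omega)).mpr (le_refl _)
            · intro j hj1 hj2
              have hqm : ((i0, j) : Int × Int) ∈ pvPB (lista.length : Int) :=
                mem_pvPB.mpr ⟨by omega, by omega, by omega⟩
              have hin := mem_left_of_lex hsplit hqm (Or.inr ⟨rfl, by omega⟩)
              have hlt := hL1 _ hin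
              simp only at hlt
              have hcf : pvCond lista i0 j (pvT lista i0 j0) = false := by
                by_contra hc
                rw [Bool.not_eq_false] at hc
                have := (pvCond_iff lista i0 j (pvT lista i0 j0)
                  (by omega) (by omega) (by omega)).mp hc
                omega
              rw [hcf]
              simp
          · intro i hi1 hi2
            unfold pvInnerJ
            apply findSome?_range_none
            intro j hj1 hj2
            have hqm : ((i, j) : Int × Int) ∈ pvPB (lista.length : Int) :=
              mem_pvPB.mpr ⟨by omega, by omega, by omega⟩
            have hin := mem_left_of_lex hsplit hqm (Or.inl (by omega))
            have hlt := hL1 _ hin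
            simp only at hlt
            have hcf : pvCond lista i j (pvT lista i0 j0) = false := by
              by_contra hc
              rw [Bool.not_eq_false] at hc
              have := (pvCond_iff lista i j (pvT lista i0 j0)
                (by omega) (by omega) (by omega)).mp hc
              omega
            rw [hcf]
            simp
        · intro tam h1 h2
          unfold pvInnerI
          apply findSome?_range_none
          intro i hi1 hi2
          unfold pvInnerJ
          apply findSome?_range_none
          intro j hj1 hj2
          have hqm : ((i, j) : Int × Int) ∈ pvPB (lista.length : Int) :=
            mem_pvPB.mpr ⟨by omega, by omega, by omega⟩
          have hle2 := hub _ hqm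
          simp only at hle2
          have hcf : pvCond lista i j tam = false := by
            by_contra hc
            rw [Bool.not_eq_false] at hc
            have := (pvCond_iff lista i j tam (by omega) (by omega) (by omega)).mp hc
            omega
          rw [hcf]
          simp
      unfold funcao
      rw [hAval, hBval]
    · have hA : (PySem.List.pyRange ((lista.length : Int) - 1) 1 (-1)).findSome?
          (fun tam => pvInnerI lista tam) = none := by
        apply A_none_of_ub lista (pvT lista i0 j0) (by omega) hub
      unfold funcao
      rw [hA, halt, heq]
      simp only
      rw [if_neg hT2]

-- ===== VERDICT (by name: the statement is the Claim_ definition above) =====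
theorem funcao_spec : Claim_equal_funcao := by
  intro lista _
  unfold Spec_funcao
  exact main_eq lista
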